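-- pv_equiv track=rewrite | github.com/vivekisreddy/RBE3002_Navigation-ROS2 | HW0/ex3.py | wordfreq_to_wordpriority
-- ===== SOURCE A (Python) =====
-- import heapq
-- import heapq
--
-- def wordfreq_to_wordpriority(wordfreq):
--     wordpriority = []
--     # Step 1: Push (frequency, word) tuples into the heap
--     # Heap will automatically sort based on the first element (frequency)
--     for word, freq in wordfreq.items():
--         heapq.heappush(wordpriority, (freq, word))
--     # Step 2: Pop elements one by one to get sorted order (ascending frequency)
--     sorted_list = []
--     while wordpriority:
--         sorted_list.append(heapq.heappop(wordpriority))
--     return sorted_list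
-- ===== SOURCE B (Python) =====
-- def wordfreq_to_wordpriority(wordfreq):
--     return sorted((freq, word) for word, freq in wordfreq.items())
-- ===== Notes on version B (the rewrite author's own statement) =====
-- stated objective: simpler
-- what changed: B drops the explicit heapq priority queue (a push loop followed by a pop-drain loop) and returns the (freq, word) tuples via one builtin sorted() call.
import Mathlib
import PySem

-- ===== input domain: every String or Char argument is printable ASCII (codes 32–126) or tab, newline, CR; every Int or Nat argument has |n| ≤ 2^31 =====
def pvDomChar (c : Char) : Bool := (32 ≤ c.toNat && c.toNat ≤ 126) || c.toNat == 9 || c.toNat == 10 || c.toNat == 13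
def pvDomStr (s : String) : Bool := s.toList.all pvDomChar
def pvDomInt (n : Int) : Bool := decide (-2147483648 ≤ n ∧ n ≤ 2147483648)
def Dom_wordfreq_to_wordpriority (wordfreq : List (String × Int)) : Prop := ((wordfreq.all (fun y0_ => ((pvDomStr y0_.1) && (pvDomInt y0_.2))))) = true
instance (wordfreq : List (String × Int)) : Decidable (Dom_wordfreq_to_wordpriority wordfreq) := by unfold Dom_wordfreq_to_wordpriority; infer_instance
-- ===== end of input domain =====

-- B replaces A's explicit heapq priority queue (push loop + pop-drain loop) by one builtin sort
-- of the (freq, word) tuples; objective: simpler.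

-- ===== PORT A =====
-- Python tuple comparison (freq, word) < (freq', word'): lexicographic (PYSEM.md: str '<' is Lean's '<')
def pyTupLt (x y : Int × String) : Bool := decide (toLex x < toLex y)

-- transliteration of heapq._siftdown(heap, startpos, pos); newitem is heap[pos] read at entry.
-- fuel only makes the loop total: the wrapper passes fuel = pos, and the hole index strictly
-- decreases each iteration, so fuel 0 forces pos = 0, where the loop guard fails anyway.
def pvSiftdownGo : Nat → List (Int × String) → Nat → Nat → (Int × String) → List (Int × String)
  | 0, heap, _, pos, newitem => heap.set pos newitem
  | fuel + 1, heap, startpos, pos, newitem =>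
    if startpos < pos then
      let parentpos := (pos - 1) / 2
      let parent := heap.getD parentpos default    -- heap[parentpos], always in range
      if pyTupLt newitem parent then
        pvSiftdownGo fuel (heap.set pos parent) startpos parentpos newitem
      else
        heap.set pos newitem
    else
      heap.set pos newitem

def pvSiftdown (heap : List (Int × String)) (startpos pos : Nat) (newitem : Int × String) :
    List (Int × String) :=
  pvSiftdownGo pos heap startpos pos newitem

-- heapq.heappush: heap.append(item); _siftdown(heap, 0, len(heap)-1)
def pvHeappush (heap : List (Int × String)) (item : Int × String) : List (Int × String) :=
  pvSiftdown (heap ++ [item]) 0 heap.length item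

-- transliteration of heapq._siftup(heap, pos); newitem is heap[pos] read at entry.
-- fuel (= len(heap) in the wrapper) only makes the loop total: the hole moves one level down
-- each iteration, so fuel 0 forces pos ≥ len(heap), where the loop guard fails anyway.
def pvSiftupGo : Nat → List (Int × String) → Nat → Nat → (Int × String) → List (Int × String)
  | 0, heap, startpos, pos, newitem => pvSiftdown (heap.set pos newitem) startpos pos newitem
  | fuel + 1, heap, startpos, pos, newitem =>
    if 2 * pos + 1 < heap.length then              -- childpos = 2*pos+1 < endpos
      -- rightpos = childpos + 1; pick right child iff in range and not heap[childpos] < heap[rightpos]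
      let childpos :=
        if 2 * pos + 2 < heap.length &&
            !(pyTupLt (heap.getD (2 * pos + 1) default) (heap.getD (2 * pos + 2) default)) then
          2 * pos + 2
        else
          2 * pos + 1
      pvSiftupGo fuel (heap.set pos (heap.getD childpos default)) startpos childpos newitem
    else
      -- heap[pos] = newitem; _siftdown(heap, startpos, pos)
      pvSiftdown (heap.set pos newitem) startpos pos newitem

def pvSiftup (heap : List (Int × String)) (startpos pos : Nat) (newitem : Int × String) :
    List (Int × String) :=
  pvSiftupGo heap.length heap startpos pos newitem

-- heapq.heappop; none exactly where Python raises IndexError (empty heap; never reached below)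
def pvHeappop (heap : List (Int × String)) :
    Option ((Int × String) × List (Int × String)) :=
  match heap.getLast? with
  | none => none                                 -- lastelt = heap.pop() raises on empty
  | some lastelt =>
    let rest := heap.dropLast
    if rest.isEmpty then
      some (lastelt, rest)
    else
      some (rest.getD 0 default, pvSiftup (rest.set 0 lastelt) 0 0 lastelt)

-- the while-loop: while wordpriority: sorted_list.append(heappop(wordpriority)).
-- fuel (= len(heap) in the wrapper) only makes the loop total: each pop removes one element,
-- so fuel 0 forces an empty heap, where the loop guard fails anyway.
def pvDrainGo : Nat → List (Int × String) → List (Int × String) → List (Int × String)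
  | 0, _, sortedList => sortedList
  | fuel + 1, heap, sortedList =>
    match pvHeappop heap with
    | none => sortedList
    | some (x, rest) => pvDrainGo fuel rest (sortedList ++ [x])

def pvDrain (heap sortedList : List (Int × String)) : List (Int × String) :=
  pvDrainGo heap.length heap sortedList

def wordfreq_to_wordpriority (wordfreq : List (String × Int)) : List (Int × String) :=
  let wordpriority := wordfreq.foldl (fun h p => pvHeappush h (p.2, p.1)) []
  pvDrain wordpriority []

-- ===== PORT B =====
-- return sorted((freq, word) for word, freq in wordfreq.items())
def wordfreq_to_wordpriority_alt (wordfreq : List (String × Int)) : List (Int × String) :=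
  PySem.List.sorted (wordfreq.map (fun p => (p.2, p.1))) (fun q => toLex q)

-- ===== PRECONDITION & SPEC =====
def Spec_wordfreq_to_wordpriority (wordfreq : List (String × Int)) (out : List (Int × String)) : Prop := out = wordfreq_to_wordpriority_alt wordfreq
instance (wordfreq : List (String × Int)) (out : List (Int × String)) : Decidable (Spec_wordfreq_to_wordpriority wordfreq out) := by unfold Spec_wordfreq_to_wordpriority; infer_instance

-- ===== CLAIM (what is proved, stated in full; the proofs are below) =====
def Claim_equal_wordfreq_to_wordpriority : Prop := ∀ (wordfreq : List (String × Int)), Dom_wordfreq_to_wordpriority wordfreq → Spec_wordfreq_to_wordpriority wordfreq (wordfreq_to_wordpriority wordfreq)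

-- ===== LEMMAS AND PROOFS =====

-- the (total) order A's comparisons live in
def tle (a b : Int × String) : Prop := toLex a ≤ toLex b

def hGet (l : List (Int × String)) (i : Nat) : Int × String := l.getD i default

-- binary-heap invariant of a Python heapq list
def isHeap (l : List (Int × String)) : Prop :=
  ∀ i, 0 < i → i < l.length → tle (hGet l ((i - 1) / 2)) (hGet l i)

theorem tlt_true {a b : Int × String} (h : pyTupLt a b = true) : toLex a < toLex b := by
  simpa [pyTupLt] using h

theorem tlt_false {a b : Int × String} (h : pyTupLt a b = false) : tle b a := by
  simp only [pyTupLt, decide_eq_false_iff_not, not_lt] at h; exact h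

theorem tle_refl (a : Int × String) : tle a a := le_refl _

theorem tle_trans {a b c : Int × String} (h1 : tle a b) (h2 : tle b c) : tle a c :=
  le_trans h1 h2

theorem hGet_set_ne {l : List (Int × String)} {i j : Nat} (h : i ≠ j) (a : Int × String) :
    hGet (l.set i a) j = hGet l j := by
  simp [hGet, List.getD_eq_getElem?_getD, List.getElem?_set_ne h]

theorem hGet_set_self {l : List (Int × String)} {i : Nat} (h : i < l.length) (a : Int × String) :
    hGet (l.set i a) i = a := by
  simp [hGet, List.getD_eq_getElem?_getD, List.getElem?_set_self h]

theorem hGet_eq_getElem {l : List (Int × String)} {i : Nat} (h : i < l.length) :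
    hGet l i = l[i] := List.getD_eq_getElem l default h

-- length preservation
theorem pvSiftdownGo_length (f : Nat) : ∀ (heap : List (Int × String)) (s p : Nat)
    (x : Int × String), (pvSiftdownGo f heap s p x).length = heap.length := by
  induction f with
  | zero => intro heap s p x; simp [pvSiftdownGo]
  | succ f ih =>
    intro heap s p x
    simp only [pvSiftdownGo]
    split_ifs <;> simp [ih, List.length_set]

theorem pvSiftdown_length (heap : List (Int × String)) (s p : Nat) (x : Int × String) :
    (pvSiftdown heap s p x).length = heap.length := pvSiftdownGo_length p heap s p x

theorem pvSiftupGo_length (f : Nat) : ∀ (heap : List (Int × String)) (s p : Nat)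
    (x : Int × String), (pvSiftupGo f heap s p x).length = heap.length := by
  induction f with
  | zero => intro heap s p x; simp [pvSiftupGo, pvSiftdown_length]
  | succ f ih =>
    intro heap s p x
    simp only [pvSiftupGo]
    split_ifs <;> simp [ih, pvSiftdown_length, List.length_set]

theorem pvSiftup_length (heap : List (Int × String)) (s p : Nat) (x : Int × String) :
    (pvSiftup heap s p x).length = heap.length := pvSiftupGo_length heap.length heap s p x

theorem pvHeappop_some_length (heap rest : List (Int × String)) (x : Int × String)
    (h : pvHeappop heap = some (x, rest)) : rest.length + 1 = heap.length := by
  unfold pvHeappop at h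
  rcases List.eq_nil_or_concat heap with rfl | ⟨ys, last, rfl⟩
  · simp at h
  · simp only [List.concat_eq_append, List.getLast?_concat, List.dropLast_concat] at h
    by_cases hy : ys.isEmpty = true
    · rw [if_pos hy] at h
      simp only [Option.some.injEq, Prod.mk.injEq] at h
      obtain ⟨-, rfl⟩ := h
      simp
    · rw [if_neg hy] at h
      simp only [Option.some.injEq, Prod.mk.injEq] at h
      obtain ⟨-, h2⟩ := h
      rw [← h2]
      simp [pvSiftup_length]

-- replacing position i by a and putting the old l[i] in front is a permutation of a :: l
theorem perm_set_cons (l : List (Int × String)) (i : Nat) (h : i < l.length)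
    (a : Int × String) : (l[i] :: l.set i a).Perm (a :: l) := by
  induction l generalizing i with
  | nil => simp at h
  | cons hd tl ih =>
    cases i with
    | zero => simpa using List.Perm.swap a hd tl
    | succ j =>
      have hj : j < tl.length := by simpa using h
      have e : ((hd :: tl)[j+1] :: (hd :: tl).set (j+1) a) = tl[j] :: hd :: tl.set j a := by
        simp
      rw [e]
      exact ((List.Perm.swap hd tl[j] _).trans ((ih j hj).cons hd)).trans
        (List.Perm.swap a hd tl)

-- move-the-hole step: writing l[j] into i and then x into j permutes like writing x into i
theorem perm_set_set (l : List (Int × String)) {i j : Nat} (hi : i < l.length)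
    (hj : j < l.length) (hij : i ≠ j) (a : Int × String) :
    ((l.set i (hGet l j)).set j a).Perm (l.set i a) := by
  rw [hGet_eq_getElem hj]
  have hjX : j < (l.set i l[j]).length := by simpa using hj
  have hXj : (l.set i l[j])[j] = l[j] := List.getElem_set_ne hij hjX
  have p1 : (l[j] :: (l.set i l[j]).set j a).Perm (a :: l.set i l[j]) := by
    have := perm_set_cons (l.set i l[j]) j hjX a
    rwa [hXj] at this
  have p2 : (l[i] :: l.set i l[j]).Perm (l[j] :: l) := perm_set_cons l i hi l[j]
  have p3 : (l[i] :: l.set i a).Perm (a :: l) := perm_set_cons l i hi a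
  have q1 : (l[i] :: l[j] :: (l.set i l[j]).set j a).Perm (a :: l[j] :: l) :=
    ((p1.cons l[i]).trans (List.Perm.swap a l[i] _)).trans (p2.cons a)
  have q2 : (l[i] :: l[j] :: l.set i a).Perm (a :: l[j] :: l) :=
    ((List.Perm.swap l[j] l[i] _).trans (p3.cons l[j])).trans (List.Perm.swap a l[j] l)
  exact ((q1.trans q2.symm).cons_inv).cons_inv

theorem pvSiftdownGo_perm (f : Nat) : ∀ (heap : List (Int × String)) (s p : Nat)
    (x : Int × String), p < heap.length → p ≤ f →
    (pvSiftdownGo f heap s p x).Perm (heap.set p x) := by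
  induction f with
  | zero => intro heap s p x _ _; exact List.Perm.refl _
  | succ f ih =>
    intro heap s p x hp hf
    simp only [pvSiftdownGo]
    split_ifs with h1 h2
    · have hpp : (p - 1) / 2 < heap.length := by omega
      have := ih (heap.set p (heap.getD ((p - 1) / 2) default)) s ((p - 1) / 2) x
        (by simpa using hpp) (by omega)
      refine this.trans ?_
      exact perm_set_set heap hp hpp (by omega) x
    · exact List.Perm.refl _
    · exact List.Perm.refl _

theorem pvSiftdown_perm (heap : List (Int × String)) (s p : Nat) (x : Int × String)
    (hp : p < heap.length) : (pvSiftdown heap s p x).Perm (heap.set p x) :=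
  pvSiftdownGo_perm p heap s p x hp le_rfl

theorem pvSiftupGo_perm (f : Nat) : ∀ (heap : List (Int × String)) (s p : Nat)
    (x : Int × String), p < heap.length →
    (pvSiftupGo f heap s p x).Perm (heap.set p x) := by
  induction f with
  | zero =>
    intro heap s p x hp
    have := pvSiftdown_perm (heap.set p x) s p x (by simpa using hp)
    simpa [pvSiftupGo, List.set_set] using this
  | succ f ih =>
    intro heap s p x hp
    simp only [pvSiftupGo]
    by_cases h1 : 2 * p + 1 < heap.length
    · rw [if_pos h1]
      set c := if 2 * p + 2 < heap.length &&
          !(pyTupLt (heap.getD (2 * p + 1) default) (heap.getD (2 * p + 2) default)) then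
          2 * p + 2 else 2 * p + 1 with hc_def
      have hc : c < heap.length := by
        rw [hc_def]; split
        · next hb =>
          have h2 := (Bool.and_eq_true _ _).mp hb
          have : 2 * p + 2 < heap.length := by simpa using h2.1
          omega
        · omega
      have hne : p ≠ c := by rw [hc_def]; split <;> omega
      have := ih (heap.set p (heap.getD c default)) s c x (by simpa using hc)
      refine this.trans ?_
      exact perm_set_set heap hp hc hne x
    · rw [if_neg h1]
      have := pvSiftdown_perm (heap.set p x) s p x (by simpa using hp)
      simpa [List.set_set] using this

theorem pvSiftup_perm (heap : List (Int × String)) (s p : Nat) (x : Int × String)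
    (hp : p < heap.length) : (pvSiftup heap s p x).Perm (heap.set p x) :=
  pvSiftupGo_perm heap.length heap s p x hp

theorem pvHeappush_perm (heap : List (Int × String)) (item : Int × String) :
    (pvHeappush heap item).Perm (item :: heap) := by
  unfold pvHeappush
  have hl : heap.length < (heap ++ [item]).length := by simp
  have h1 := pvSiftdown_perm (heap ++ [item]) 0 heap.length item hl
  have h2 : (heap ++ [item]).set heap.length item = heap ++ [item] := by
    have := List.set_getElem_self (as := heap ++ [item]) (i := heap.length) hl
    simp only [List.getElem_concat_length] at this
    exact this
  rw [h2] at h1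
  exact h1.trans (List.perm_append_singleton item heap)

-- bubble-up correctness: heap is a heap except around the hole pos carrying newitem
theorem pvSiftdownGo_inv (f : Nat) : ∀ (heap : List (Int × String)) (pos : Nat)
    (x : Int × String), pos ≤ f → pos < heap.length →
    (∀ i, 0 < i → i < heap.length → i ≠ pos → (i - 1) / 2 ≠ pos →
      tle (hGet heap ((i - 1) / 2)) (hGet heap i)) →
    (∀ i, i < heap.length → (i - 1) / 2 = pos → i ≠ pos → tle x (hGet heap i)) →
    (∀ i, 0 < pos → i < heap.length → (i - 1) / 2 = pos → i ≠ pos →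
      tle (hGet heap ((pos - 1) / 2)) (hGet heap i)) →
    isHeap (pvSiftdownGo f heap 0 pos x) := by
  induction f with
  | zero =>
    intro heap pos x hf hpos H1 H2 H3
    have hp0 : pos = 0 := by omega
    subst hp0
    intro i hi0 hilen
    simp only [pvSiftdownGo, List.length_set] at hilen ⊢
    have hie : i ≠ 0 := by omega
    by_cases hpar : (i - 1) / 2 = 0
    · rw [hpar, hGet_set_self hpos, hGet_set_ne (fun he => hie he.symm)]
      exact H2 i hilen hpar hie
    · rw [hGet_set_ne (fun he => hpar he.symm), hGet_set_ne (fun he => hie he.symm)]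
      exact H1 i hi0 hilen hie hpar
  | succ f ih =>
    intro heap pos x hf hpos H1 H2 H3
    simp only [pvSiftdownGo]
    by_cases h0 : 0 < pos
    · rw [if_pos h0]
      by_cases hlt : pyTupLt x (heap.getD ((pos - 1) / 2) default) = true
      · rw [if_pos hlt]
        -- recurse at the parent position
        apply ih _ ((pos - 1) / 2) x (by omega)
        · simp only [List.length_set]; omega
        · -- H1 for the new hole
          intro i hi0 hilen hip hipp
          simp only [List.length_set] at hilen
          by_cases hie : i = pos
          · exact absurd (by rw [hie]) hipp
          · by_cases hpar : (i - 1) / 2 = pos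
            · rw [hpar, hGet_set_self hpos, hGet_set_ne (fun he => hie he.symm)]
              exact H3 i h0 hilen hpar hie
            · rw [hGet_set_ne (fun he => hpar he.symm), hGet_set_ne (fun he => hie he.symm)]
              exact H1 i hi0 hilen hie hpar
        · -- H2 for the new hole
          intro i hilen hpar hip
          simp only [List.length_set] at hilen
          by_cases hie : i = pos
          · subst hie
            rw [hGet_set_self hpos]
            exact le_of_lt (tlt_true hlt)
          · rw [hGet_set_ne (fun he => hie he.symm)]
            have hi0 : 0 < i := by omega
            have e := H1 i hi0 hilen hie (by omega)
            rw [hpar] at e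
            exact tle_trans (le_of_lt (tlt_true hlt)) e
        · -- H3 for the new hole
          intro i hpp0 hilen hpar hip
          simp only [List.length_set] at hilen
          rw [hGet_set_ne (by omega : pos ≠ ((pos - 1) / 2 - 1) / 2)]
          by_cases hie : i = pos
          · rw [hie, hGet_set_self hpos]
            exact H1 ((pos - 1) / 2) hpp0 (by omega) (by omega) (by omega)
          · rw [hGet_set_ne (fun he => hie he.symm)]
            have hi0 : 0 < i := by omega
            have e1 := H1 ((pos - 1) / 2) hpp0 (by omega) (by omega) (by omega)
            have e2 := H1 i hi0 hilen hie (by omega)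
            rw [hpar] at e2
            exact tle_trans e1 e2
      · rw [if_neg hlt]
        have hltf : pyTupLt x (heap.getD ((pos - 1) / 2) default) = false := by
          simpa using hlt
        -- final placement: heap.set pos x is a heap
        intro i hi0 hilen
        simp only [List.length_set] at hilen
        by_cases hie : i = pos
        · rw [hie, hGet_set_ne (by omega : pos ≠ (pos - 1) / 2), hGet_set_self hpos]
          exact tlt_false hltf
        · by_cases hpar : (i - 1) / 2 = pos
          · rw [hpar, hGet_set_self hpos, hGet_set_ne (fun he => hie he.symm)]
            exact H2 i hilen hpar hie
          · rw [hGet_set_ne (fun he => hpar he.symm), hGet_set_ne (fun he => hie he.symm)]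
            exact H1 i hi0 hilen hie hpar
    · rw [if_neg h0]
      have hp0 : pos = 0 := by omega
      subst hp0
      intro i hi0 hilen
      simp only [List.length_set] at hilen
      have hie : i ≠ 0 := by omega
      by_cases hpar : (i - 1) / 2 = 0
      · rw [hpar, hGet_set_self hpos, hGet_set_ne (fun he => hie he.symm)]
        exact H2 i hilen hpar hie
      · rw [hGet_set_ne (fun he => hpar he.symm), hGet_set_ne (fun he => hie he.symm)]
        exact H1 i hi0 hilen hie hpar

theorem pvSiftdown_inv (heap : List (Int × String)) (pos : Nat) (x : Int × String)
    (hpos : pos < heap.length)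
    (H1 : ∀ i, 0 < i → i < heap.length → i ≠ pos → (i - 1) / 2 ≠ pos →
      tle (hGet heap ((i - 1) / 2)) (hGet heap i))
    (H2 : ∀ i, i < heap.length → (i - 1) / 2 = pos → i ≠ pos → tle x (hGet heap i))
    (H3 : ∀ i, 0 < pos → i < heap.length → (i - 1) / 2 = pos → i ≠ pos →
      tle (hGet heap ((pos - 1) / 2)) (hGet heap i)) :
    isHeap (pvSiftdown heap 0 pos x) :=
  pvSiftdownGo_inv pos heap pos x le_rfl hpos H1 H2 H3

-- bubble-down correctness: all edges incident to the hole pos are exempt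
theorem pvSiftupGo_inv (f : Nat) : ∀ (heap : List (Int × String)) (pos : Nat)
    (x : Int × String), heap.length ≤ f + pos → pos < heap.length →
    (∀ i, 0 < i → i < heap.length → i ≠ pos → (i - 1) / 2 ≠ pos →
      tle (hGet heap ((i - 1) / 2)) (hGet heap i)) →
    (∀ i, 0 < pos → i < heap.length → (i - 1) / 2 = pos → i ≠ pos →
      tle (hGet heap ((pos - 1) / 2)) (hGet heap i)) →
    isHeap (pvSiftupGo f heap 0 pos x) := by
  induction f with
  | zero =>
    intro heap pos x hf hpos D1 D3
    simp only [pvSiftupGo]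
    apply pvSiftdown_inv (heap.set pos x) pos x (by simpa using hpos)
    · intro i hi0 hilen hie hpar
      simp only [List.length_set] at hilen
      rw [hGet_set_ne (fun he => hpar he.symm), hGet_set_ne (fun he => hie he.symm)]
      exact D1 i hi0 hilen hie hpar
    · intro i hilen hpar hie
      simp only [List.length_set] at hilen
      exfalso; omega
    · intro i _ hilen hpar hie
      simp only [List.length_set] at hilen
      exfalso; omega
  | succ f ih =>
    intro heap pos x hf hpos D1 D3
    simp only [pvSiftupGo]
    by_cases hch : 2 * pos + 1 < heap.length
    · rw [if_pos hch]
      set c := if 2 * pos + 2 < heap.length &&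
          !(pyTupLt (heap.getD (2 * pos + 1) default) (heap.getD (2 * pos + 2) default)) then
          2 * pos + 2 else 2 * pos + 1 with hc_def
      have hcc : (c = 2 * pos + 1 ∧ (2 * pos + 2 < heap.length &&
            !(pyTupLt (heap.getD (2 * pos + 1) default) (heap.getD (2 * pos + 2) default))) = false)
          ∨ (c = 2 * pos + 2 ∧ (2 * pos + 2 < heap.length &&
            !(pyTupLt (heap.getD (2 * pos + 1) default) (heap.getD (2 * pos + 2) default))) = true) := by
        by_cases hb : (2 * pos + 2 < heap.length &&
            !(pyTupLt (heap.getD (2 * pos + 1) default) (heap.getD (2 * pos + 2) default))) = true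
        · right; exact ⟨by rw [hc_def, if_pos hb], hb⟩
        · left; exact ⟨by rw [hc_def, if_neg hb], by simpa using hb⟩
      have hc : c < heap.length := by
        rcases hcc with ⟨h, _⟩ | ⟨h, hb⟩
        · omega
        · have h2 := (Bool.and_eq_true _ _).mp hb
          have : 2 * pos + 2 < heap.length := by simpa using h2.1
          omega
      have hcpos : pos < c := by rcases hcc with ⟨h, _⟩ | ⟨h, _⟩ <;> omega
      have hcpar : (c - 1) / 2 = pos := by rcases hcc with ⟨h, _⟩ | ⟨h, _⟩ <;> omega
      -- minimality of the chosen child among the children of pos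
      have hmin : ∀ i, i < heap.length → (i - 1) / 2 = pos → 0 < i → i ≠ c →
          tle (hGet heap c) (hGet heap i) := by
        intro i hilen hipar hi0 hic
        have hi12 : i = 2 * pos + 1 ∨ i = 2 * pos + 2 := by omega
        rcases hcc with ⟨h, hb⟩ | ⟨h, hb⟩
        · -- c is the left child; i must be the right child, and left < right
          have hir : i = 2 * pos + 2 := by omega
          rcases Bool.and_eq_false_iff.mp hb with h1 | h2
          · exfalso
            have : ¬ 2 * pos + 2 < heap.length := of_decide_eq_false h1
            omega
          · have h3 : pyTupLt (heap.getD (2 * pos + 1) default)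
                (heap.getD (2 * pos + 2) default) = true := by simpa using h2
            rw [h, hir]
            exact le_of_lt (tlt_true h3)
        · -- c is the right child; i must be the left child, and not left < right
          have hil : i = 2 * pos + 1 := by omega
          have h2 := (Bool.and_eq_true _ _).mp hb
          have h3 : pyTupLt (heap.getD (2 * pos + 1) default)
              (heap.getD (2 * pos + 2) default) = false := by simpa using h2.2
          rw [h, hil]
          exact tlt_false h3
      apply ih _ c x
      · simp only [List.length_set]; omega
      · simp only [List.length_set]; omega
      · -- D1 for the new hole c
        intro i hi0 hilen hic hipc
        simp only [List.length_set] at hilen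
        by_cases hie : i = pos
        · have h0p : 0 < pos := hie ▸ hi0
          rw [hie, hGet_set_ne (by omega : pos ≠ (pos - 1) / 2), hGet_set_self hpos]
          exact D3 c h0p hc hcpar (by omega)
        · by_cases hpar : (i - 1) / 2 = pos
          · rw [hpar, hGet_set_self hpos, hGet_set_ne (fun he => hie he.symm)]
            exact hmin i hilen hpar (by omega) hic
          · rw [hGet_set_ne (fun he => hpar he.symm), hGet_set_ne (fun he => hie he.symm)]
            exact D1 i hi0 hilen hie hpar
      · -- D3 for the new hole c
        intro i _hc0 hilen hpar hic
        simp only [List.length_set] at hilen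
        rw [hcpar, hGet_set_self hpos, hGet_set_ne (by omega : pos ≠ i)]
        have e := D1 i (by omega) hilen (by omega) (by omega)
        rw [hpar] at e
        exact e
    · rw [if_neg hch]
      apply pvSiftdown_inv (heap.set pos x) pos x (by simpa using hpos)
      · intro i hi0 hilen hie hpar
        simp only [List.length_set] at hilen
        rw [hGet_set_ne (fun he => hpar he.symm), hGet_set_ne (fun he => hie he.symm)]
        exact D1 i hi0 hilen hie hpar
      · intro i hilen hpar hie
        simp only [List.length_set] at hilen
        exfalso; omega
      · intro i _ hilen hpar hie
        simp only [List.length_set] at hilen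
        exfalso; omega

theorem pvSiftup_inv (heap : List (Int × String)) (pos : Nat) (x : Int × String)
    (hpos : pos < heap.length)
    (D1 : ∀ i, 0 < i → i < heap.length → i ≠ pos → (i - 1) / 2 ≠ pos →
      tle (hGet heap ((i - 1) / 2)) (hGet heap i))
    (D3 : ∀ i, 0 < pos → i < heap.length → (i - 1) / 2 = pos → i ≠ pos →
      tle (hGet heap ((pos - 1) / 2)) (hGet heap i)) :
    isHeap (pvSiftup heap 0 pos x) :=
  pvSiftupGo_inv heap.length heap pos x (by omega) hpos D1 D3

theorem pvHeappush_inv (heap : List (Int × String)) (item : Int × String)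
    (h : isHeap heap) : isHeap (pvHeappush heap item) := by
  unfold pvHeappush
  apply pvSiftdown_inv (heap ++ [item]) heap.length item (by simp)
  · intro i hi0 hilen hie hpar
    simp only [List.length_append, List.length_cons, List.length_nil] at hilen
    have hi : i < heap.length := by omega
    have hp : (i - 1) / 2 < heap.length := by omega
    rw [show hGet (heap ++ [item]) i = hGet heap i from List.getD_append _ _ _ _ hi,
      show hGet (heap ++ [item]) ((i - 1) / 2) = hGet heap ((i - 1) / 2) from
        List.getD_append _ _ _ _ hp]
    exact h i hi0 hi
  · intro i hilen hpar hie
    exfalso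
    simp only [List.length_append, List.length_cons, List.length_nil] at hilen
    omega
  · intro i _ hilen hpar hie
    exfalso
    simp only [List.length_append, List.length_cons, List.length_nil] at hilen
    omega

theorem root_min (l : List (Int × String)) (h : isHeap l) :
    ∀ i, i < l.length → tle (hGet l 0) (hGet l i) := by
  intro i
  induction i using Nat.strong_induction_on with
  | _ i ih =>
  intro hil
  rcases Nat.eq_zero_or_pos i with rfl | hi0
  · exact tle_refl _
  · exact tle_trans (ih ((i - 1) / 2) (by omega) (by omega)) (h i hi0 hil)

theorem pvHeappop_spec (heap : List (Int × String)) (h : isHeap heap) (hne : heap ≠ []) :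
    ∃ rest, pvHeappop heap = some (hGet heap 0, rest) ∧ isHeap rest ∧
      (hGet heap 0 :: rest).Perm heap := by
  rcases List.eq_nil_or_concat heap with rfl | ⟨ys, last, rfl⟩
  · exact absurd rfl hne
  simp only [List.concat_eq_append] at *
  unfold pvHeappop
  rw [List.getLast?_concat]
  simp only [List.dropLast_concat]
  by_cases hy : ys = []
  · subst hy
    refine ⟨[], ?_, ?_, ?_⟩
    · simp [hGet]
    · intro i hi0 hil; simp at hil
    · simp [hGet]
  · have h0y : 0 < ys.length := List.length_pos_of_ne_nil hy
    have hyse : ys.isEmpty = false := by simpa using hy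
    have hg0 : hGet (ys ++ [last]) 0 = hGet ys 0 := List.getD_append _ _ _ _ h0y
    refine ⟨pvSiftup (ys.set 0 last) 0 0 last, ?_, ?_, ?_⟩
    · simp only [hyse, Bool.false_eq_true, if_false, hg0]
      rfl
    · -- the reduced list is again a heap
      apply pvSiftup_inv (ys.set 0 last) 0 last (by simpa using h0y)
      · intro i hi0 hilen hie hpar
        simp only [List.length_set] at hilen
        rw [hGet_set_ne (fun he => hpar he.symm), hGet_set_ne (fun he => hie he.symm)]
        have hi : i < (ys ++ [last]).length := by simp; omega
        rw [show hGet ys i = hGet (ys ++ [last]) i from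
            (List.getD_append _ _ _ _ hilen).symm,
          show hGet ys ((i - 1) / 2) = hGet (ys ++ [last]) ((i - 1) / 2) from
            (List.getD_append _ _ _ _ (by omega)).symm]
        exact h i hi0 hi
      · intro i hi0 _ _ _; exact absurd hi0 (by omega)
    · -- permutation accounting
      have hperm1 : (pvSiftup (ys.set 0 last) 0 0 last).Perm (ys.set 0 last) := by
        have := pvSiftup_perm (ys.set 0 last) 0 0 last (by simpa using h0y)
        simpa [List.set_set] using this
      have hperm2 : (ys[0] :: ys.set 0 last).Perm (last :: ys) := perm_set_cons ys 0 h0y last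
      have hg00 : hGet (ys ++ [last]) 0 = ys[0] := by rw [hg0]; exact hGet_eq_getElem h0y
      rw [hg00]
      exact ((hperm1.cons ys[0]).trans hperm2).trans (List.perm_append_singleton last ys).symm

theorem pvDrainGo_acc (f : Nat) : ∀ heap acc : List (Int × String),
    pvDrainGo f heap acc = acc ++ pvDrainGo f heap [] := by
  induction f with
  | zero => intro heap acc; simp [pvDrainGo]
  | succ f ih =>
    intro heap acc
    simp only [pvDrainGo]
    cases hp : pvHeappop heap with
    | none => simp
    | some p =>
      obtain ⟨x, rest⟩ := p
      simp only
      rw [ih rest (acc ++ [x]), ih rest ([] ++ [x])]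
      simp

theorem pvDrainGo_spec (f : Nat) : ∀ heap : List (Int × String), heap.length ≤ f →
    isHeap heap → (pvDrainGo f heap []).Perm heap ∧ (pvDrainGo f heap []).Pairwise tle := by
  induction f with
  | zero =>
    intro heap hlen _
    have : heap = [] := List.eq_nil_of_length_eq_zero (by omega)
    subst this
    exact ⟨List.Perm.refl _, List.Pairwise.nil⟩
  | succ f ih =>
    intro heap hlen hheap
    by_cases hne : heap = []
    · subst hne
      simp only [pvDrainGo, pvHeappop]
      exact ⟨List.Perm.refl _, List.Pairwise.nil⟩
    · obtain ⟨rest, hp, hrest, hperm⟩ := pvHeappop_spec heap hheap hne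
      have hl := pvHeappop_some_length heap rest (hGet heap 0) hp
      have step : pvDrainGo (f + 1) heap [] = hGet heap 0 :: pvDrainGo f rest [] := by
        simp only [pvDrainGo]
        rw [hp]
        simp only
        rw [pvDrainGo_acc f rest ([] ++ [hGet heap 0])]
        simp
      obtain ⟨ihperm, ihpair⟩ := ih rest (by omega) hrest
      constructor
      · rw [step]
        exact (ihperm.cons (hGet heap 0)).trans hperm
      · rw [step, List.pairwise_cons]
        refine ⟨?_, ihpair⟩
        intro y hy
        have hyheap : y ∈ heap :=
          hperm.mem_iff.mp (List.mem_cons_of_mem _ (ihperm.mem_iff.mp hy))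
        obtain ⟨i, hi, rfl⟩ := List.mem_iff_getElem.mp hyheap
        rw [← hGet_eq_getElem hi]
        exact root_min heap hheap i hi

theorem pvDrain_spec (heap : List (Int × String)) (hheap : isHeap heap) :
    (pvDrain heap []).Perm heap ∧ (pvDrain heap []).Pairwise tle :=
  pvDrainGo_spec heap.length heap le_rfl hheap

theorem build_spec (l : List (String × Int)) : ∀ acc : List (Int × String), isHeap acc →
    isHeap (l.foldl (fun h p => pvHeappush h (p.2, p.1)) acc) ∧
    (l.foldl (fun h p => pvHeappush h (p.2, p.1)) acc).Perm
      (acc ++ l.map (fun p => (p.2, p.1))) := by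
  induction l with
  | nil =>
    intro acc hacc
    refine ⟨hacc, ?_⟩
    simp
  | cons p t iht =>
    intro acc hacc
    simp only [List.foldl_cons, List.map_cons]
    obtain ⟨h1, h2⟩ := iht (pvHeappush acc (p.2, p.1)) (pvHeappush_inv acc _ hacc)
    refine ⟨h1, h2.trans ?_⟩
    have hpp : (pvHeappush acc (p.2, p.1) ++ t.map (fun p => (p.2, p.1))).Perm
        (((p.2, p.1) :: acc) ++ t.map (fun p => (p.2, p.1))) :=
      (pvHeappush_perm acc (p.2, p.1)).append_right _
    exact hpp.trans List.perm_middle.symm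

-- ===== VERDICT (by name: the statement is the Claim_ definition above) =====
theorem wordfreq_to_wordpriority_spec : Claim_equal_wordfreq_to_wordpriority := by
  intro wordfreq _
  unfold Spec_wordfreq_to_wordpriority wordfreq_to_wordpriority wordfreq_to_wordpriority_alt
  simp only
  obtain ⟨hH, hHperm⟩ := build_spec wordfreq [] (by intro i hi0 hil; simp at hil)
  set H := wordfreq.foldl (fun h p => pvHeappush h (p.2, p.1)) [] with hHdef
  set items := wordfreq.map (fun p => (p.2, p.1)) with hitems
  obtain ⟨hAperm, hApair⟩ := pvDrain_spec H hH
  have hBperm : (PySem.List.sorted items (fun q => toLex q)).Perm items :=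
    PySem.List.sorted_perm items _ false
  have hBpair : (PySem.List.sorted items (fun q => toLex q)).Pairwise tle :=
    PySem.List.sorted_pairwise items (fun q => toLex q)
  apply List.Perm.eq_of_pairwise (le := tle)
  · intro a b _ _ h1 h2
    exact toLex_inj.mp (le_antisymm h1 h2)
  · exact hApair
  · exact hBpair
  · exact (hAperm.trans (by simpa using hHperm)).trans hBperm.symm
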